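-- pv_equiv track=rewrite | github.com/Evgene-Kopylov/manga-tracker | fastapi/routers/page_utilitys.py | remove_index_number
-- ===== SOURCE A (Python) =====
-- def remove_index_number(line: str) -> str:
--     """
--     Remove trailing digits at start of string
--
--     :param line: part of url
--     :return:
--     """
--     res = ''
--     for char in line:
--         if res:
--             res += char
--         elif not char.isdigit():
--             res += char
--     return res
-- ===== SOURCE B (Python) =====
-- def remove_index_number(line: str) -> str:
--     i = next((k for k, c in enumerate(line) if not c.isdigit()), len(line))
--     return line[i:]
-- ===== Notes on version B (the rewrite author's own statement) =====
-- stated objective: simpler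
-- what changed: Replaced the per-character accumulating loop with finding the first non-digit index and returning a single slice.
import Mathlib
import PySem

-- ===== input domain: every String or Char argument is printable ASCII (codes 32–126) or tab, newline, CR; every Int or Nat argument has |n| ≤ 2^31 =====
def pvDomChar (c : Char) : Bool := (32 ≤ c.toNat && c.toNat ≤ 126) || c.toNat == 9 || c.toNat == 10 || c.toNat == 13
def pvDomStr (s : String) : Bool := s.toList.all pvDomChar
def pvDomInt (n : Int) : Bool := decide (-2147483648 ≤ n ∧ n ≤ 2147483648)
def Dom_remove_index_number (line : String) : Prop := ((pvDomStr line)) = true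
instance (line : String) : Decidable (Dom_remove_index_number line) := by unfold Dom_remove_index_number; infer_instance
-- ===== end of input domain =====

-- B replaces A's per-character accumulating loop with find-first-non-digit-index then one slice (objective: simpler).

-- ===== PORT A =====
-- step of A's for-loop: append char if res is nonempty, else append only if not a digit
def pvStepA (res : List Char) (c : Char) : List Char :=
  if res ≠ [] then res ++ [c]
  else if ¬ (PySem.Chars.isdigit c) then res ++ [c]
  else res

def remove_index_number (line : String) : String :=
  String.mk (line.toList.foldl pvStepA [])

-- ===== PORT B =====
-- index of the first non-digit character (len if all digits), as in Source B's next(...)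
def pvFirstNonDigit : List Char → Nat
  | [] => 0
  | c :: cs => if PySem.Chars.isdigit c then pvFirstNonDigit cs + 1 else 0

def remove_index_number_alt (line : String) : String :=
  String.mk (line.toList.drop (pvFirstNonDigit line.toList))

-- ===== PRECONDITION & SPEC =====
def Spec_remove_index_number (line : String) (out : String) : Prop := out = remove_index_number_alt line
instance (line : String) (out : String) : Decidable (Spec_remove_index_number line out) := by unfold Spec_remove_index_number; infer_instance

-- ===== CLAIM (what is proved, stated in full; the proofs are below) =====
def Claim_equal_remove_index_number : Prop := ∀ (line : String), Dom_remove_index_number line → Spec_remove_index_number line (remove_index_number line)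

-- ===== LEMMAS AND PROOFS =====
theorem pvFoldA_nonempty (l acc : List Char) (h : acc ≠ []) :
    l.foldl pvStepA acc = acc ++ l := by
  induction l generalizing acc with
  | nil => simp
  | cons c cs ih =>
      simp only [List.foldl_cons, pvStepA, if_pos h]
      rw [ih _ (by simp)]
      simp

theorem pvFoldA_eq_drop (l : List Char) :
    l.foldl pvStepA [] = l.drop (pvFirstNonDigit l) := by
  induction l with
  | nil => simp [pvFirstNonDigit]
  | cons c cs ih =>
      by_cases hd : PySem.Chars.isdigit c
      · simpa [pvStepA, pvFirstNonDigit, hd] using ih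
      · simp [pvStepA, pvFirstNonDigit, hd, pvFoldA_nonempty cs [c] (by simp)]

-- ===== VERDICT (by name: the statement is the Claim_ definition above) =====
theorem remove_index_number_spec : Claim_equal_remove_index_number := by
  intro line _
  unfold Spec_remove_index_number remove_index_number remove_index_number_alt
  rw [pvFoldA_eq_drop]
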